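-- pv_equiv track=rewrite | github.com/ZoranPandovski/al-go-rithms | juliandpc-change-date.py | substitui
-- ===== SOURCE A (Python) =====
-- def substitui(f, a, n):
--     posicao = len(f)
--     f2 = ""
--     for i in range(-len(a), -len(f)-1, -1):
--         p = ""
--         aux = i
--         for j in range(aux, aux+len(a), 1):
--             p += f[j]
--             aux -= 1
--         if p == a:
--             posicao += i
--             break
--     cont = 0
--     while cont < len(f):
--         if cont == posicao:
--             for i in range(0, len(n), 1):
--                 f2 += n[i]
--             cont += len(a)-1
--         else:
--             f2 += f[cont]
--         cont += 1
--     if f == f2: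
--         return f
--     else:
--         return f2
-- ===== SOURCE B (Python) =====
-- def substitui(f, a, n):
--     if a == "":
--         return f
--     i = f.rfind(a)
--     if i == -1:
--         return f
--     return f[:i] + n + f[i + len(a):]
-- ===== Notes on version B (the rewrite author's own statement) =====
-- stated objective: faster
-- what changed: A hand-searches the rightmost occurrence with a negative-index double loop and rebuilds the string character by character with a position counter; B guards the empty-pattern case and otherwise delegates to str.rfind plus one slice concatenation f[:i] + n + f[i+len(a):].
import Mathlib
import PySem

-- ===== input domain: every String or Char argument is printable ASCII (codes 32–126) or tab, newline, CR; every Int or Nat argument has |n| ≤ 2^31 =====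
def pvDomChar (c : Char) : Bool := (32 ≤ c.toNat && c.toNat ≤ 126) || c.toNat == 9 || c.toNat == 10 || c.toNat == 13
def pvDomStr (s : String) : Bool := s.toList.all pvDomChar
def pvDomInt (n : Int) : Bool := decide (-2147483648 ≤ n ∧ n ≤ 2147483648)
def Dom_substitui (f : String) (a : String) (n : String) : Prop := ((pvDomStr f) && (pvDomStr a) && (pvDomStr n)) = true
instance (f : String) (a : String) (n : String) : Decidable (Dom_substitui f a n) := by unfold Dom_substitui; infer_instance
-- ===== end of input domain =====

-- B replaces A's hand-rolled rightmost-occurrence search and char-by-char rebuild by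
-- str.rfind plus one slice concatenation (idiomatic; return value proved identical).

-- ===== PORT A =====
-- inner loop: p = ""; aux = i; for j in range(aux, aux+len(a), 1): p += f[j]; aux -= 1
-- (the in-loop decrement of aux never affects the range, already computed with aux = i;
--  every j this loop reaches is a valid negative index, so the getD default is never used)
def substituiP (f : List Char) (a : List Char) (i : Int) : List Char :=
  (PySem.List.pyRange i (i + (a.length : Int)) 1).foldl
    (fun p j => p ++ [PySem.List.pyGetD f j ' ']) []

-- the scan 'for i in range(-len(a), -len(f)-1, -1): … if p == a: posicao += i; break'
def substituiSearch (f : List Char) (a : List Char) : List Int → Option Int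
  | [] => none
  | i :: rest => if substituiP f a i = a then some i else substituiSearch f a rest

-- the 'while cont < len(f)' rebuild loop; fuel = len(f)+1 bounds the iteration count
-- (each iteration Python performs advances cont by at least 1 in every reachable state)
def substituiBuild (f a n : List Char) (posicao : Int) : Nat → Int → List Char → List Char
  | 0, _, f2 => f2
  | fuel+1, cont, f2 =>
    if cont < (f.length : Int) then
      if cont = posicao then
        substituiBuild f a n posicao fuel (cont + ((a.length : Int) - 1) + 1)
          ((PySem.List.pyRange 0 (n.length : Int) 1).foldl
            (fun acc j => acc ++ [PySem.List.pyGetD n j ' ']) f2)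
      else
        substituiBuild f a n posicao fuel (cont + 1) (f2 ++ [PySem.List.pyGetD f cont ' '])
    else f2

def substitui (f : String) (a : String) (n : String) : String :=
  let L := f.toList
  let A := a.toList
  let N := n.toList
  -- posicao = len(f); the scan adds i when it breaks on a match, else leaves it
  let posicao : Int := (L.length : Int) +
    ((substituiSearch L A
        (PySem.List.pyRange (-(A.length : Int)) (-(L.length : Int) - 1) (-1))).getD 0)
  let f2 := substituiBuild L A N posicao (L.length + 1) 0 []
  if L = f2 then f else String.ofList f2

-- ===== PORT B =====
-- def substitui(f, a, n):
--     if a == "": return f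
--     i = f.rfind(a)
--     if i == -1: return f
--     return f[:i] + n + f[i + len(a):]
def substitui_alt (f : String) (a : String) (n : String) : String :=
  if a = "" then f
  else
    let i := PySem.Str.rfind f a
    if i = -1 then f
    else String.ofList (PySem.List.slice f.toList none (some i) ++ n.toList ++
                    PySem.List.slice f.toList (some (i + (a.toList.length : Int))) none)

-- ===== PRECONDITION & SPEC =====
def Spec_substitui (f : String) (a : String) (n : String) (out : String) : Prop := out = substitui_alt f a n
instance (f : String) (a : String) (n : String) (out : String) : Decidable (Spec_substitui f a n out) := by unfold Spec_substitui; infer_instance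

-- ===== CLAIM (what is proved, stated in full; the proofs are below) =====
def Claim_equal_substitui : Prop := ∀ (f : String) (a : String) (n : String), Dom_substitui f a n → Spec_substitui f a n (substitui f a n)

-- ===== LEMMAS AND PROOFS =====

-- the rightmost-match scan of rfind.go, as an Option-valued helper
def rmostAux (L A : List Char) : Nat → Option Nat
  | 0 => if A.isPrefixOf L then some 0 else none
  | q+1 => if A.isPrefixOf (L.drop (q+1)) then some (q+1) else rmostAux L A q

theorem pyGetD_negIdx (L : List Char) (q : Nat) (h : q < L.length) :
    PySem.List.pyGetD L ((q : Int) - (L.length : Int)) ' ' = L[q] := by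
  have h0 : ¬ (0 ≤ (q : Int) - (L.length : Int)) := by omega
  have h1 : -(L.length : Int) ≤ (q : Int) - (L.length : Int) := by omega
  simp only [PySem.List.pyGetD, PySem.List.pyGet?, PySem.List.pyIdx?, h0, if_false, h1, if_pos]
  have h2 : L.length - (-(((q : Int)) - (L.length : Int))).toNat = q := by omega
  simp only [h2]
  have h3 : L.length - (L.length - q) = q := by omega
  simp only [Option.bind_some, List.getElem?_eq_getElem h, Option.getD_some]
  try rfl

theorem pyGetD_natIdx (L : List Char) (q : Nat) (h : q < L.length) :
    PySem.List.pyGetD L (q : Int) ' ' = L[q] := by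
  simp [PySem.List.pyGetD, PySem.List.pyGet?_natCast, List.getElem?_eq_getElem h]

theorem substituiP_eq (L : List Char) :
    ∀ (t q : Nat) (p : List Char), q + t ≤ L.length →
    (PySem.List.pyRange ((q : Int) - L.length) ((q : Int) - L.length + t) 1).foldl
      (fun p j => p ++ [PySem.List.pyGetD L j ' ']) p = p ++ (L.drop q).take t := by
  intro t
  induction t with
  | zero =>
    intro q p _
    rw [PySem.List.pyRange_one_eq_nil (by omega)]
    simp
  | succ t ih =>
    intro q p hq
    have hqm : q < L.length := by omega
    rw [PySem.List.pyRange_one_cons (by omega)]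
    simp only [List.foldl_cons]
    rw [pyGetD_negIdx L q hqm]
    have hc : (q : Int) - L.length + 1 = ((q+1 : Nat) : Int) - L.length := by push_cast; ring
    have hc2 : (q : Int) - (L.length:Int) + ((t+1:Nat) : Int) = ((q+1 : Nat) : Int) - L.length + (t : Nat) := by
      push_cast; ring
    rw [hc2, hc, ih (q+1) (p ++ [L[q]]) (by omega)]
    rw [show List.drop q L = L[q] :: List.drop (q+1) L from List.drop_eq_getElem_cons hqm,
        List.take_succ_cons]
    simp

theorem substituiP_take (L A : List Char) (q : Nat) (h : q + A.length ≤ L.length) :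
    substituiP L A ((q : Int) - L.length) = (L.drop q).take A.length := by
  unfold substituiP
  have := substituiP_eq L A.length q [] h
  simpa using this

theorem prefix_iff_take (L A : List Char) (q : Nat) :
    (L.drop q).take A.length = A ↔ A.isPrefixOf (L.drop q) := by
  rw [List.isPrefixOf_iff_prefix, List.prefix_iff_eq_take]
  constructor <;> intro h <;> exact h.symm

theorem rmostAux_some (L A : List Char) :
    ∀ j q, rmostAux L A j = some q → A.isPrefixOf (L.drop q) ∧ q ≤ j := by
  intro j
  induction j with
  | zero =>
    intro q h
    unfold rmostAux at h
    split at h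
    · simp_all
      cases h; simpa using ‹_›
    · simp_all
  | succ j ih =>
    intro q h
    unfold rmostAux at h
    split at h
    · cases h; exact ⟨by assumption, le_refl _⟩
    · obtain ⟨h1, h2⟩ := ih q h
      exact ⟨h1, by omega⟩

theorem rmostAux_high (L A : List Char) (j : Nat) (hk : 1 ≤ A.length)
    (hj : L.length < j + 1 + A.length) :
    rmostAux L A (j+1) = rmostAux L A j := by
  have hnp : ¬ A.isPrefixOf (L.drop (j+1)) = true := by
    intro h
    have := (List.isPrefixOf_iff_prefix.mp h).length_le
    simp [List.length_drop] at this
    omega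
  rw [show rmostAux L A (j+1)
        = if A.isPrefixOf (L.drop (j+1)) then some (j+1) else rmostAux L A j from rfl,
      if_neg hnp]

theorem rmostAux_stable (L A : List Char) (_hk : 1 ≤ A.length) (hkm : A.length ≤ L.length) :
    ∀ d, L.length - A.length + d ≤ L.length →
      rmostAux L A (L.length - A.length + d) = rmostAux L A (L.length - A.length) := by
  intro d
  induction d with
  | zero => intro _; rfl
  | succ d ih =>
    intro hd
    have : L.length - A.length + (d+1) = (L.length - A.length + d) + 1 := by omega
    rw [this, rmostAux_high L A _ _hk (by omega), ih (by omega)]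

theorem rmostAux_none_of_long (L A : List Char) (hk : L.length < A.length) :
    ∀ j, rmostAux L A j = none := by
  intro j
  induction j with
  | zero =>
    unfold rmostAux
    have : ¬ A.isPrefixOf L := by
      intro h
      have := (List.isPrefixOf_iff_prefix.mp h).length_le
      omega
    simp [this]
  | succ j ih =>
    unfold rmostAux
    have : ¬ A.isPrefixOf (L.drop (j+1)) := by
      intro h
      have := (List.isPrefixOf_iff_prefix.mp h).length_le
      simp [List.length_drop] at this
      omega
    simp [this, ih]

theorem rfind_go_eq_rmostAux (L A : List Char) :
    ∀ j, PySem.Chars.rfind.go L A j =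
      (match rmostAux L A j with | some q => (q : Int) | none => -1) := by
  intro j
  induction j with
  | zero =>
    rw [PySem.Chars.rfind.go.eq_def,
        show rmostAux L A 0 = if A.isPrefixOf L then some 0 else none from rfl]
    by_cases h : A.isPrefixOf L <;> simp [h]
  | succ j ih =>
    rw [PySem.Chars.rfind.go.eq_def,
        show rmostAux L A (j+1)
          = if A.isPrefixOf (L.drop (j+1)) then some (j+1) else rmostAux L A j from rfl]
    by_cases h : A.isPrefixOf (L.drop (j+1)) <;> simp [h, ih]

theorem search_eq_rmostAux (L A : List Char) (_hk : 1 ≤ A.length) :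
    ∀ q, q + A.length ≤ L.length →
    substituiSearch L A (PySem.List.pyRange ((q : Int) - L.length) (-(L.length : Int) - 1) (-1)) =
      (rmostAux L A q).map (fun r : Nat => (r : Int) - (L.length : Int)) := by
  intro q
  induction q with
  | zero =>
    intro hq
    rw [PySem.List.pyRange_neg_one_cons (by omega)]
    unfold substituiSearch
    rw [PySem.List.pyRange_neg_one_eq_nil (by omega)]
    have hp : substituiP L A ((0 : Nat) - (L.length : Int)) = (L.drop 0).take A.length := by
      have := substituiP_take L A 0 (by omega)
      simpa using this
    rw [show rmostAux L A 0 = if A.isPrefixOf L then some 0 else none from rfl]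
    simp only [Nat.cast_zero] at hp ⊢
    rw [hp]
    by_cases h : (L.drop 0).take A.length = A
    · rw [if_pos h, if_pos (by have := (prefix_iff_take L A 0).mp h; simpa using this)]
      rfl
    · rw [if_neg h,
        if_neg (by intro hc; exact h ((prefix_iff_take L A 0).mpr (by simpa using hc)))]
      rfl
  | succ q ih =>
    intro hq
    rw [PySem.List.pyRange_neg_one_cons (by omega)]
    unfold substituiSearch
    have hp := substituiP_take L A (q+1) hq
    rw [hp,
        show rmostAux L A (q+1)
          = if A.isPrefixOf (L.drop (q+1)) then some (q+1) else rmostAux L A q from rfl]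
    by_cases h : (L.drop (q+1)).take A.length = A
    · rw [if_pos h, if_pos ((prefix_iff_take L A (q+1)).mp h)]
      rfl
    · rw [if_neg h, if_neg (fun hc => h ((prefix_iff_take L A (q+1)).mpr hc))]
      have hcast : ((q+1 : Nat) : Int) - (L.length : Int) - 1 = (q : Int) - L.length := by
        push_cast; ring
      rw [hcast, ih (by omega)]

theorem foldl_append_chars (N : List Char) (f2 : List Char) :
    (PySem.List.pyRange 0 (N.length : Int) 1).foldl
      (fun acc j => acc ++ [PySem.List.pyGetD N j ' ']) f2 = f2 ++ N := by
  have := PySem.List.foldl_pyRange_zero_pyGetD' N ' '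
    (fun acc c => acc ++ [c]) f2
  rw [this]
  clear this
  induction N generalizing f2 with
  | nil => simp
  | cons c cs ih =>
    simp only [List.foldl_cons]
    rw [ih]
    simp

theorem build_copy (L A N : List Char) (posicao : Int) :
    ∀ (fuel : Nat) (c : Nat) (f2 : List Char), L.length ≤ fuel + c →
      (∀ r : Nat, c ≤ r → r < L.length → (r : Int) ≠ posicao) →
      substituiBuild L A N posicao fuel (c : Int) f2 = f2 ++ L.drop c := by
  intro fuel
  induction fuel with
  | zero =>
    intro c f2 hf _
    unfold substituiBuild
    rw [List.drop_eq_nil_of_le (by omega)]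
    simp
  | succ fuel ih =>
    intro c f2 hf hne
    unfold substituiBuild
    by_cases hc : c < L.length
    · rw [if_pos (by exact_mod_cast hc)]
      rw [if_neg (hne c (le_refl _) hc)]
      rw [pyGetD_natIdx L c hc]
      have : (c : Int) + 1 = ((c+1 : Nat) : Int) := by push_cast; ring
      rw [this, ih (c+1) (f2 ++ [L[c]]) (by omega) (fun r h1 h2 => hne r (by omega) h2)]
      rw [List.drop_eq_getElem_cons hc]
      simp
    · rw [if_neg (by exact_mod_cast hc)]
      rw [List.drop_eq_nil_of_le (by omega)]
      simp

theorem build_replace (L A N : List Char) (q : Nat)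
    (hk : 1 ≤ A.length) (hq : q + A.length ≤ L.length) :
    ∀ (fuel : Nat) (c : Nat) (f2 : List Char), c ≤ q → L.length ≤ fuel + c →
      substituiBuild L A N (q : Int) fuel (c : Int) f2 =
        f2 ++ (L.drop c).take (q - c) ++ N ++ L.drop (q + A.length) := by
  intro fuel
  induction fuel with
  | zero =>
    intro c f2 hc hf
    omega
  | succ fuel ih =>
    intro c f2 hc hf
    unfold substituiBuild
    have hcm : c < L.length := by omega
    rw [if_pos (by exact_mod_cast hcm)]
    by_cases hcq : c = q
    · subst hcq
      rw [if_pos rfl]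
      rw [foldl_append_chars]
      have hstep : (c : Int) + ((A.length : Int) - 1) + 1 = ((c + A.length : Nat) : Int) := by
        push_cast; ring
      rw [hstep]
      rw [build_copy L A N (c : Int) fuel (c + A.length) (f2 ++ N) (by omega)
        (fun r h1 h2 => by omega)]
      simp
    · rw [if_neg (by exact_mod_cast hcq)]
      rw [pyGetD_natIdx L c hcm]
      have : (c : Int) + 1 = ((c+1 : Nat) : Int) := by push_cast; ring
      rw [this, ih (c+1) (f2 ++ [L[c]]) (by omega) (by omega)]
      have hq' : q - c = (q - (c+1)) + 1 := by omega
      rw [hq', show List.drop c L = L[c] :: List.drop (c+1) L from List.drop_eq_getElem_cons hcm,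
          List.take_succ_cons]
      simp



-- ===== VERDICT (by name: the statement is the Claim_ definition above) =====
theorem substitui_spec : Claim_equal_substitui := by
  intro f a n _
  unfold Spec_substitui substitui substitui_alt
  simp only []
  set L := f.toList with hL
  set A := a.toList with hA
  set N := n.toList with hN
  by_cases ha : a = ""
  · -- empty pattern: A's scan matches immediately at i = 0, posicao = len(f), pure copy
    have hA0 : A = [] := by rw [hA, ha]; rfl
    rw [if_pos ha]
    have hrange : PySem.List.pyRange (-(A.length : Int)) (-(L.length : Int) - 1) (-1) =
        0 :: PySem.List.pyRange (-1) (-(L.length : Int) - 1) (-1) := by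
      rw [hA0]
      simpa using PySem.List.pyRange_neg_one_cons (a := 0) (b := -(L.length : Int) - 1) (by omega)
    rw [hrange]
    unfold substituiSearch
    have hp : substituiP L A 0 = A := by
      unfold substituiP
      rw [hA0]
      simp [PySem.List.pyRange_one_eq_nil]
    rw [if_pos hp]
    simp only [Option.getD_some]
    have hbuild : substituiBuild L A N ((L.length : Int) + 0) (L.length + 1) ((0:Nat) : Int) [] =
        [] ++ L.drop 0 := by
      apply build_copy L A N _ _ 0 [] (by omega)
      intro r _ hr
      omega
    simp only [Nat.cast_zero] at hbuild
    rw [hbuild]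
    simp
  · -- nonempty pattern
    rw [if_neg ha]
    have hk : 1 ≤ A.length := by
      rcases Nat.eq_zero_or_pos A.length with h | h
      · exact absurd (String.toList_eq_nil_iff.mp (List.length_eq_zero_iff.mp (by rw [← hA]; exact h))) ha
      · exact h
    have hrfind : PySem.Str.rfind f a =
        (match rmostAux L A L.length with | some q => (q : Int) | none => -1) := by
      rw [PySem.Str.rfind_eq, ← hL, ← hA]
      exact rfind_go_eq_rmostAux L A L.length
    by_cases hkm : A.length ≤ L.length
    · -- pattern not longer than the string: scan = rmostAux (len L - len A) = rmostAux (len L)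
      have hcast : -(A.length : Int) = ((L.length - A.length : Nat) : Int) - (L.length : Int) := by
        omega
      have hsearch := search_eq_rmostAux L A hk (L.length - A.length) (by omega)
      rw [← hcast] at hsearch
      have hstable := rmostAux_stable L A hk hkm A.length (by omega)
      have hmm : L.length - A.length + A.length = L.length := by omega
      rw [hmm] at hstable
      rw [hsearch]
      rcases hrm : rmostAux L A (L.length - A.length) with _ | q
      · -- not found: both return f
        rw [hrm] at hstable
        rw [hstable] at hrfind
        have hrf2 : PySem.Str.rfind f a = -1 := hrfind
        rw [hrf2]
        simp only [Option.map_none, Option.getD_none]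
        have hbuild : substituiBuild L A N ((L.length : Int) + 0) (L.length + 1) ((0:Nat) : Int) [] =
            [] ++ L.drop 0 := by
          apply build_copy L A N _ _ 0 [] (by omega)
          intro r _ hr
          omega
        simp only [Nat.cast_zero] at hbuild
        rw [hbuild]
        simp
      · -- found at q: A rebuilds take q ++ N ++ drop (q+k); B slices the same
        rw [hrm] at hstable
        rw [hstable] at hrfind
        have hrf2 : PySem.Str.rfind f a = (q : Int) := hrfind
        obtain ⟨hpref, _⟩ := rmostAux_some L A _ q hrm
        have hqk : q + A.length ≤ L.length := by
          have := (List.isPrefixOf_iff_prefix.mp hpref).length_le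
          simp [List.length_drop] at this
          omega
        rw [hrf2]
        rw [if_neg (show ¬((q : Int) = -1) by omega)]
        simp only [Option.map_some, Option.getD_some]
        have hpos : (L.length : Int) + ((q : Int) - (L.length : Int)) = (q : Int) := by ring
        rw [hpos]
        have hbuild := build_replace L A N q hk hqk (L.length + 1) 0 [] (by omega) (by omega)
        simp only [Nat.cast_zero] at hbuild
        rw [hbuild]
        rw [PySem.List.slice_to _ (by omega : (0:Int) ≤ (q : Int))]
        rw [PySem.List.slice_from _ (by omega : (0:Int) ≤ (q : Int) + (A.length : Int))]
        have h1 : ((q : Int)).toNat = q := by omega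
        have h2 : ((q : Int) + (A.length : Int)).toNat = q + A.length := by omega
        rw [h1, h2]
        have hdt : ([] : List Char) ++ (L.drop 0).take (q - 0) ++ N ++ L.drop (q + A.length) =
            L.take q ++ N ++ L.drop (q + A.length) := by simp
        rw [hdt]
        by_cases heq : L = L.take q ++ N ++ L.drop (q + A.length)
        · rw [if_pos heq, ← heq, hL, String.ofList_toList]
        · rw [if_neg heq]
    · -- pattern longer than the string: empty scan, rfind = -1, both return f
      have hempty : PySem.List.pyRange (-(A.length : Int)) (-(L.length : Int) - 1) (-1) = [] :=
        PySem.List.pyRange_neg_one_eq_nil (by omega)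
      rw [hempty]
      unfold substituiSearch
      have hnone := rmostAux_none_of_long L A (by omega) L.length
      rw [hnone] at hrfind
      have hrf2 : PySem.Str.rfind f a = -1 := hrfind
      rw [hrf2]
      simp only [Option.getD_none]
      have hbuild : substituiBuild L A N ((L.length : Int) + 0) (L.length + 1) ((0:Nat) : Int) [] =
          [] ++ L.drop 0 := by
        apply build_copy L A N _ _ 0 [] (by omega)
        intro r _ hr
        omega
      simp only [Nat.cast_zero] at hbuild
      rw [hbuild]
      simp
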